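-- pv_equiv track=rewrite | github.com/apparentorder/aoc | 2023/day12.py | parse
-- ===== SOURCE A (Python) =====
-- def parse(input, unfold = 1):
--     springs = []
--     reference = []
--
--     for line in input:
--         parts = line.split()
--         springs += [list(parts[0])]
--         reference += [list(map(int, parts[1].split(',')))]
--
--         for _ in range(1, unfold):
--             springs[-1] += ["?"] + list(parts[0])
--             reference[-1] += list(map(int, parts[1].split(',')))
--
--     return springs, reference
-- ===== SOURCE B (Python) =====
-- def parse(input, unfold = 1):
--     def rep(s, r, k):
--         # k >= 1: build ("?"-joined k copies of s, r repeated k times) by binary doubling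
--         if k <= 1:
--             return s, r
--         hs, hr = rep(s, r, k // 2)
--         ds, dr = hs + "?" + hs, hr + hr
--         if k % 2:
--             ds, dr = ds + "?" + s, dr + r
--         return ds, dr
--
--     springs = []
--     reference = []
--     for line in input:
--         parts = line.split()
--         s, r = rep(parts[0], [int(x) for x in parts[1].split(',')], max(1, unfold))
--         springs.append(list(s))
--         reference.append(r)
--     return springs, reference
-- ===== Notes on version B (the rewrite author's own statement) =====
-- stated objective: alternative
-- what changed: Each unfolded row is built by a recursive binary-doubling helper (square-and-multiply on string/list concatenation: double the accumulated half, add one extra copy when the count is odd) instead of A's loop that appends one copy per iteration onto the last row.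
import Mathlib
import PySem

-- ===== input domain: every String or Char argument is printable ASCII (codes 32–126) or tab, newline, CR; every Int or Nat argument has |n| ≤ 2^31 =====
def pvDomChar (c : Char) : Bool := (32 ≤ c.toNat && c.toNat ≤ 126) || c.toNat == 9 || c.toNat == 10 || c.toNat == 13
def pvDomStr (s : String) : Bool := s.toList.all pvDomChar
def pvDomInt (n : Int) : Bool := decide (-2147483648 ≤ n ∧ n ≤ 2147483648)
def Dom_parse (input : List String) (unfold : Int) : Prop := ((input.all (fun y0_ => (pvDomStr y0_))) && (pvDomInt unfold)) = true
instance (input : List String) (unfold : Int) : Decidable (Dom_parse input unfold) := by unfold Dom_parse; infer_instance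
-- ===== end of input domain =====

set_option maxRecDepth 10000

-- B builds each unfolded row by recursive binary doubling (square-and-multiply on
-- concatenation) instead of A's append-one-copy-per-iteration loop (objective:
-- alternative; same total cost).

-- ===== PORT A =====
-- loop body of A: build one fully-unfolded row (springs[-1]/reference[-1] grow in place)
def parseLine (line : String) (unfold : Int) : List String × List Int :=
  let parts := PySem.Str.split₀ line
  let s0 := (PySem.List.pyGetD parts 0 "").toList.map (fun c => String.mk [c])
  let r0 := (PySem.Chars.splitOn (PySem.List.pyGetD parts 1 "").toList [',']).map
      (fun t => (PySem.Int.ofChars? t).getD 0)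
  (PySem.List.pyRange 1 unfold 1).foldl
    (fun (p : List String × List Int) _ => (p.1 ++ ("?" :: s0), p.2 ++ r0)) (s0, r0)

def parse (input : List String) (unfold : Int) : List (List String) × List (List Int) :=
  input.foldl (fun acc line =>
      let row := parseLine line unfold
      (acc.1 ++ [row.1], acc.2 ++ [row.2]))
    ([], [])

-- ===== PORT B =====
-- rep(s, r, k): k >= 1 copies by binary doubling (hs+'?'+hs / hr+hr, plus one
-- extra copy when k is odd), exactly as in Source B
def repRow (s : List Char) (r : List Int) (k : Nat) : List Char × List Int :=
  if k ≤ 1 then (s, r)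
  else
    let h := repRow s r (k / 2)
    let p := (h.1 ++ '?' :: h.1, h.2 ++ h.2)
    if k % 2 = 1 then (p.1 ++ '?' :: s, p.2 ++ r) else p
termination_by k
decreasing_by omega

def parse_alt (input : List String) (unfold : Int) : List (List String) × List (List Int) :=
  input.foldl (fun acc line =>
      let parts := PySem.Str.split₀ line
      let row := repRow (PySem.List.pyGetD parts 0 "").toList
        ((PySem.Chars.splitOn (PySem.List.pyGetD parts 1 "").toList [',']).map
          (fun t => (PySem.Int.ofChars? t).getD 0))
        (max 1 unfold).toNat
      (acc.1 ++ [row.1.map (fun c => String.mk [c])], acc.2 ++ [row.2]))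
    ([], [])

-- ===== PRECONDITION & SPEC =====
-- kernel-fast helpers for Pre_ only (via List.rec so 'decide' evaluates them cheaply)
def pvSpace (c : Char) : Bool :=
  c = ' ' || c = '\t' || c = '\n' || c = '\r' || c = Char.ofNat 11 || c = Char.ofNat 12

-- str.split() (whitespace words) on the ASCII domain
def pvWords (cs : List Char) : List Char → List (List Char) :=
  List.rec (motive := fun _ => List Char → List (List Char))
    (fun cur => if cur.isEmpty then [] else [cur.reverse])
    (fun c _ ih cur =>
      if pvSpace c then (if cur.isEmpty then ih [] else cur.reverse :: ih [])
      else ih (c :: cur)) cs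

-- s.split(',') (keeps empty pieces)
def pvCommas (cs : List Char) : List Char → List (List Char) :=
  List.rec (motive := fun _ => List Char → List (List Char))
    (fun cur => [cur.reverse])
    (fun c _ ih cur => if c = ',' then cur.reverse :: ih [] else ih (c :: cur)) cs

-- Pre_ excludes exactly the inputs on which the Python A raises: a line with fewer
-- than two whitespace-separated fields (IndexError) or a second field whose
-- comma-separated tokens are not all valid int() literals (ValueError).
def Pre_parse (input : List String) (unfold : Int) : Prop :=
  ∀ line ∈ input, 2 ≤ (pvWords line.toList []).length ∧
    ∀ t ∈ pvCommas ((pvWords line.toList []).getD 1 []) [],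
      (PySem.Int.ofChars? t).isSome = true
instance (input : List String) (unfold : Int) : Decidable (Pre_parse input unfold) := by
  unfold Pre_parse; infer_instance

def pvWitness_parse : List String × Int := (["#.#? 1,1", ".# 2"], 3)

def Spec_parse (input : List String) (unfold : Int) (out : List (List String) × List (List Int)) : Prop := out = parse_alt input unfold
instance (input : List String) (unfold : Int) (out : List (List String) × List (List Int)) : Decidable (Spec_parse input unfold out) := by unfold Spec_parse; infer_instance

-- ===== CLAIM (what is proved, stated in full; the proofs are below) =====
def Claim_equal_parse : Prop := ∀ (input : List String) (unfold : Int), Dom_parse input unfold → Pre_parse input unfold → Spec_parse input unfold (parse input unfold)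

-- ===== LEMMAS AND PROOFS =====

-- flatten of replicate splits over +
lemma flat_rep_add {α : Type} (x : List α) (a b : Nat) :
    (List.replicate (a + b) x).flatten
      = (List.replicate a x).flatten ++ (List.replicate b x).flatten := by
  rw [List.replicate_add, List.flatten_append]

-- repRow computes the linear "one copy appended k-1 times" normal form
lemma repRow_eq (s : List Char) (r : List Int) :
    ∀ k, 1 ≤ k →
      repRow s r k = (s ++ (List.replicate (k - 1) ('?' :: s)).flatten,
                      (List.replicate k r).flatten) := by
  intro k
  induction k using Nat.strong_induction_on with
  | _ k ih =>
    intro hk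
    rw [repRow]
    by_cases h1 : k ≤ 1
    · have : k = 1 := by omega
      subst this; simp
    · have hm : 1 ≤ k / 2 := by omega
      have ihm := ih (k / 2) (by omega) hm
      simp only [if_neg h1, ihm]
      by_cases ho : k % 2 = 1
      · simp only [if_pos ho]
        have h2 : k = (k / 2) + (k / 2) + 1 := by omega
        refine Prod.ext ?_ ?_
        · show (s ++ (List.replicate (k / 2 - 1) ('?' :: s)).flatten) ++
            '?' :: (s ++ (List.replicate (k / 2 - 1) ('?' :: s)).flatten) ++ '?' :: s
            = s ++ (List.replicate (k - 1) ('?' :: s)).flatten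
          have hk1 : k - 1 = (k / 2 - 1) + 1 + (k / 2 - 1) + 1 := by omega
          rw [hk1, flat_rep_add, flat_rep_add, flat_rep_add]
          simp [List.append_assoc]
        · show ((List.replicate (k / 2) r).flatten ++ (List.replicate (k / 2) r).flatten) ++ r
            = (List.replicate k r).flatten
          have hk2 : k = (k / 2) + (k / 2) + 1 := by omega
          conv_rhs => rw [hk2]
          rw [flat_rep_add, flat_rep_add]
          simp [List.append_assoc]
      · simp only [if_neg ho]
        refine Prod.ext ?_ ?_
        · show (s ++ (List.replicate (k / 2 - 1) ('?' :: s)).flatten) ++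
            '?' :: (s ++ (List.replicate (k / 2 - 1) ('?' :: s)).flatten)
            = s ++ (List.replicate (k - 1) ('?' :: s)).flatten
          have hk1 : k - 1 = (k / 2 - 1) + 1 + (k / 2 - 1) := by omega
          rw [hk1, flat_rep_add, flat_rep_add]
          simp [List.append_assoc]
        · show (List.replicate (k / 2) r).flatten ++ (List.replicate (k / 2) r).flatten
            = (List.replicate k r).flatten
          have hk2 : k = (k / 2) + (k / 2) := by omega
          conv_rhs => rw [hk2]
          rw [flat_rep_add]

-- a foldl that only appends fixed blocks to both components is a replicate-flatten
lemma foldl_pair_append {α β γ : Type} (l : List γ) (x : List α) (y : List β) :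
    ∀ (a : List α) (b : List β),
      l.foldl (fun (p : List α × List β) _ => (p.1 ++ x, p.2 ++ y)) (a, b)
        = (a ++ (List.replicate l.length x).flatten, b ++ (List.replicate l.length y).flatten) := by
  induction l with
  | nil => intro a b; simp
  | cons h t ih =>
      intro a b
      simp only [List.foldl_cons, List.length_cons, List.replicate_succ, List.flatten_cons, ih]
      simp [List.append_assoc]

lemma max_toNat (u : Int) : (max 1 u).toNat = (u - 1).toNat + 1 := by omega

-- each A-row equals the corresponding B-row
lemma row_eq (line : String) (u : Int) :
    parseLine line u
      = (let parts := PySem.Str.split₀ line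
         let row := repRow (PySem.List.pyGetD parts 0 "").toList
            ((PySem.Chars.splitOn (PySem.List.pyGetD parts 1 "").toList [',']).map
              (fun t => (PySem.Int.ofChars? t).getD 0))
            (max 1 u).toNat
         (row.1.map (fun c => String.mk [c]), row.2)) := by
  unfold parseLine
  simp only []
  rw [foldl_pair_append]
  rw [repRow_eq _ _ _ (by omega : 1 ≤ (max 1 u).toNat)]
  simp only [max_toNat, Nat.add_sub_cancel, PySem.List.length_pyRange_one,
    List.map_append, List.map_flatten, List.map_replicate, List.map_cons]
  rfl

-- ===== VERDICT (by name: the statement is the Claim_ definition above) =====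
theorem parse_spec : Claim_equal_parse := by
  intro input u _ _
  show parse input u = parse_alt input u
  unfold parse parse_alt
  refine PySem.List.foldl_congr_mem _ _ _ _ (fun acc line _ => ?_)
  rw [row_eq line u]
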